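-- pv_equiv track=rewrite | github.com/yacoublambaz/EECE230PssSpring2022 | mar29th.py | checkFrequenciesA
-- ===== SOURCE A (Python) =====
-- def checkFrequenciesA(L):
--     #return True if each element is repeated exactly 3 times
--     for i in range(len(L)):
--         count = 0
--         for j in range(len(L)):
--             if L[i] == L[j]:
--                 count = count + 1
--         if count != 3:
--             return False
--     return True
-- ===== SOURCE B (Python) =====
-- def checkFrequenciesA(L):
--     # one pass: build a frequency dict, then check every count is 3
--     counts = {}
--     for x in L:
--         counts[x] = counts.get(x, 0) + 1
--     return all(c == 3 for c in counts.values())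
-- ===== Notes on version B (the rewrite author's own statement) =====
-- stated objective: alternative
-- what changed: Replaces the nested pairwise count (for each index, rescan the whole list) by a single pass that builds a frequency dictionary and then checks that every count equals 3; it trades A's early exit on the first bad element for a dictionary built in one pass.
import Mathlib
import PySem

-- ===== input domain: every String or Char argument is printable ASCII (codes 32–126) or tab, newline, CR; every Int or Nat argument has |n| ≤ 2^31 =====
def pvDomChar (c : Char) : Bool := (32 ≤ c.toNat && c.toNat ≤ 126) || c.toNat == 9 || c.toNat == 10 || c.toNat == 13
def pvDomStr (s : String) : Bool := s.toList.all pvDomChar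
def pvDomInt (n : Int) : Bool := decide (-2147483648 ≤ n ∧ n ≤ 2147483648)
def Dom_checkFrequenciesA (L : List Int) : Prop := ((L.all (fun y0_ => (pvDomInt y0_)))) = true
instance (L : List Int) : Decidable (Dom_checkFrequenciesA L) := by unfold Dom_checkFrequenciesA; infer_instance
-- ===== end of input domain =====

-- B builds a frequency dictionary in one pass and checks every count is 3, instead of A's nested pairwise counting (objective: alternative).

-- ===== PORT A =====
-- inner loop: count = number of j in range(len(L)) with L[i] == L[j]
def pvInnerCount (L : List Int) (i : Int) : Int :=
  (PySem.List.pyRange 0 (L.length : Int) 1).foldl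
    (fun count j => if PySem.List.pyGetD L i 0 = PySem.List.pyGetD L j 0 then count + 1 else count) 0

-- outer loop over i in range(len(L)) with early return False
def pvAGo (L : List Int) : List Int → Bool
  | [] => true
  | i :: rest => if pvInnerCount L i ≠ 3 then false else pvAGo L rest

def checkFrequenciesA (L : List Int) : Bool :=
  pvAGo L (PySem.List.pyRange 0 (L.length : Int) 1)

-- ===== PORT B =====
def checkFrequenciesA_alt (L : List Int) : Bool :=
  ((L.foldl (fun d x => d.insert x (d.getD x 0 + 1))
      (PySem.Dict.empty : PySem.Dict Int Int)).values).all (fun c => c == 3)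

-- ===== PRECONDITION & SPEC =====
def Spec_checkFrequenciesA (L : List Int) (out : Bool) : Prop := out = checkFrequenciesA_alt L
instance (L : List Int) (out : Bool) : Decidable (Spec_checkFrequenciesA L out) := by unfold Spec_checkFrequenciesA; infer_instance

-- ===== CLAIM (what is proved, stated in full; the proofs are below) =====
def Claim_equal_checkFrequenciesA : Prop := ∀ (L : List Int), Dom_checkFrequenciesA L → Spec_checkFrequenciesA L (checkFrequenciesA L)

-- ===== LEMMAS AND PROOFS =====

-- counting loop = List.count
theorem pvFoldl_eq_count (L : List Int) (a : Int) :
    List.foldl (fun c x => if a = x then c + 1 else c) (0:Int) L = (L.count a : Int) := by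
  have h := PySem.List.foldl_count_if (fun x => a == x) L 0
  simp only [beq_iff_eq, zero_add] at h
  rw [h]
  norm_cast
  simp [List.count_eq_countP']
  congr 1
  funext x
  exact Bool.eq_iff_iff.mpr ⟨fun h => by simpa using (beq_iff_eq.mp h).symm,
    fun h => by simpa using (beq_iff_eq.mp h).symm⟩

-- the inner loop computes the multiplicity of L[i] in L
theorem pvInnerCount_eq (L : List Int) (i : Int) :
    pvInnerCount L i = (L.count (PySem.List.pyGetD L i 0) : Int) := by
  unfold pvInnerCount
  rw [PySem.List.foldl_pyRange_zero_pyGetD' L 0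
    (fun count x => if PySem.List.pyGetD L i 0 = x then count + 1 else count) 0]
  exact pvFoldl_eq_count L _

-- the outer loop is an all over the index list
theorem pvAGo_eq_all (L : List Int) (idxs : List Int) :
    pvAGo L idxs = idxs.all (fun i => pvInnerCount L i == 3) := by
  induction idxs with
  | nil => rfl
  | cons i rest ih => by_cases h : pvInnerCount L i = 3 <;> simp [pvAGo, h, ih]

theorem checkFrequenciesA_eq_all (L : List Int) :
    checkFrequenciesA L = L.all (fun x => (L.count x : Int) == 3) := by
  unfold checkFrequenciesA
  rw [pvAGo_eq_all]
  apply Bool.eq_iff_iff.mpr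
  simp only [List.all_eq_true, PySem.List.mem_pyRange_one, beq_iff_eq]
  constructor
  · intro h x hx
    obtain ⟨k, hk, rfl⟩ := List.mem_iff_getElem.mp hx
    have hc := h (k : Int) ⟨by positivity, by exact_mod_cast hk⟩
    rw [pvInnerCount_eq, PySem.List.pyGetD_natCast, List.getD_eq_getElem?_getD,
      List.getElem?_eq_getElem hk] at hc
    exact_mod_cast hc
  · intro h i hi
    rw [pvInnerCount_eq]
    have hnn : 0 ≤ i := hi.1
    have hlt : i.toNat < L.length := by omega
    rw [PySem.List.pyGetD_of_nonneg (h := hnn), List.getD_eq_getElem?_getD,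
      List.getElem?_eq_getElem hlt]
    exact_mod_cast h _ (List.getElem_mem hlt)

theorem alt_eq_all (L : List Int) :
    checkFrequenciesA_alt L = (PySem.Set.ofList L).all (fun x => (L.count x : Int) == 3) := by
  unfold checkFrequenciesA_alt
  rw [PySem.Dict.foldl_insert_getD_add_one_eq_counter]
  simp only [PySem.Dict.values, PySem.Dict.items_counter, List.map_map, List.all_map]
  rfl

-- ===== VERDICT (by name: the statement is the Claim_ definition above) =====
theorem checkFrequenciesA_spec : Claim_equal_checkFrequenciesA := by
  intro L _
  unfold Spec_checkFrequenciesA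
  rw [checkFrequenciesA_eq_all, alt_eq_all]
  apply Bool.eq_iff_iff.mpr
  simp [List.all_eq_true, PySem.Set.mem_ofList]
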